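-- pv_equiv track=rewrite | github.com/zenxr/discord_winston_bot | winston.py | splitmessage
-- ===== SOURCE A (Python) =====
-- def splitmessage(s):
--     words = []
--     inword = 0
--     for c in s:
--         if c in " \r\n\t": #whitepsace
--             inword = 0
--         elif not inword:
--             words = words + [c]
--             inword = 1
--         else:
--             words[-1] = words[-1] + c
--     return words
-- ===== SOURCE B (Python) =====
-- def splitmessage(s):
--     words = []
--     n = len(s)
--     i = 0
--     while i < n:
--         if s[i] in " \r\n\t":
--             i += 1
--         else:
--             j = i
--             while j < n and s[j] not in " \r\n\t":
--                 j += 1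
--             words.append(s[i:j])
--             i = j
--     return words
-- ===== Notes on version B (the rewrite author's own statement) =====
-- stated objective: faster
-- what changed: Replaces the per-character inword state machine that rebuilds the word list (words = words + [c]) and re-concatenates the last word one character at a time with a two-pointer scan that skips a whitespace run, finds the end of each word run, and appends the slice once.
import Mathlib
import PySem

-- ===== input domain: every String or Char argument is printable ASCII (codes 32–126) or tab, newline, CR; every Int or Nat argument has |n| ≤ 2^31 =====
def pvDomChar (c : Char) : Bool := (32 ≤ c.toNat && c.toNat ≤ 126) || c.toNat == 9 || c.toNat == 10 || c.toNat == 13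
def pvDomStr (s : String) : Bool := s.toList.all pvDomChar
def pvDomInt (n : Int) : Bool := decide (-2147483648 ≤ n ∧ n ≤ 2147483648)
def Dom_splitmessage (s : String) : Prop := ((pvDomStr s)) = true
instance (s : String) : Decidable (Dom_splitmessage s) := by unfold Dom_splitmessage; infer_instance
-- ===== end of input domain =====

-- B replaces A's per-character inword state machine (quadratic list/string re-concatenation)
-- with a linear two-pointer run scan; objective: faster.

def pvWs (c : Char) : Bool := c = ' ' || c = '\r' || c = '\n' || c = '\t'

-- ===== PORT A =====
def splitStep (st : List String × Int) (c : Char) : List String × Int :=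
  if pvWs c then (st.1, 0)
  else if st.2 == 0 then (st.1 ++ [String.ofList [c]], 1)
  else (PySem.List.pySetD st.1 (-1) (PySem.List.pyGetD st.1 (-1) "" ++ String.ofList [c]), 1)

def splitmessage (s : String) : List String :=
  (s.toList.foldl splitStep ([], 0)).1

-- ===== PORT B =====
-- scan: the outer while of Source B; for a word run it takes the run (inner while) and continues after it
def splitScan (l : List Char) : List String :=
  match l with
  | [] => []
  | c :: rest =>
    if pvWs c then splitScan rest
    else String.ofList ((c :: rest).takeWhile (fun d => !pvWs d)) ::
         splitScan ((c :: rest).dropWhile (fun d => !pvWs d))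
termination_by l.length
decreasing_by
  · simp
  · simp only [List.dropWhile_cons]
    simp_all
    exact List.length_dropWhile_le _ _

def splitmessage_alt (s : String) : List String := splitScan s.toList

-- ===== PRECONDITION & SPEC =====
def Spec_splitmessage (s : String) (out : List String) : Prop := out = splitmessage_alt s
instance (s : String) (out : List String) : Decidable (Spec_splitmessage s out) := by unfold Spec_splitmessage; infer_instance

-- ===== CLAIM (what is proved, stated in full; the proofs are below) =====
def Claim_equal_splitmessage : Prop := ∀ (s : String), Dom_splitmessage s → Spec_splitmessage s (splitmessage s)

-- ===== LEMMAS AND PROOFS =====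

theorem pv_mk_append (a b : List Char) : String.ofList a ++ String.ofList b = String.ofList (a ++ b) := by
  simp

theorem pv_setLast (acc : List String) (w v : String) :
    PySem.List.pySetD (acc ++ [w]) (-1) v = acc ++ [v] := by
  simp [PySem.List.pySetD, PySem.List.pySet?, PySem.List.pyIdx?]

theorem splitScan_cons_ws (c : Char) (l : List Char) (h : pvWs c = true) :
    splitScan (c :: l) = splitScan l := by
  rw [splitScan]; simp [h]

theorem splitScan_cons_word (c : Char) (l : List Char) (h : pvWs c = false) :
    splitScan (c :: l) =
      String.ofList (c :: l.takeWhile (fun d => !pvWs d)) ::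
        splitScan (l.dropWhile (fun d => !pvWs d)) := by
  rw [splitScan]; simp [h]

theorem splitA_loop (l : List Char) :
    (∀ acc : List String, (l.foldl splitStep (acc, (0 : Int))).1 = acc ++ splitScan l) ∧
    (∀ (acc : List String) (w : String),
      (l.foldl splitStep (acc ++ [w], (1 : Int))).1 =
        acc ++ (w ++ String.ofList (l.takeWhile (fun d => !pvWs d))) ::
          splitScan (l.dropWhile (fun d => !pvWs d))) := by
  induction l with
  | nil =>
    constructor
    · intro acc; simp [splitScan]
    · intro acc w; simp [splitScan]
  | cons c l ih =>
    constructor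
    · intro acc
      by_cases h : pvWs c = true
      · simp only [List.foldl_cons, splitStep, h, if_pos]
        rw [ih.1, splitScan_cons_ws c l h]
      · simp only [Bool.not_eq_true] at h
        simp only [List.foldl_cons, splitStep, h, Bool.false_eq_true, if_false, beq_self_eq_true,
          if_pos]
        rw [ih.2 acc (String.ofList [c]), splitScan_cons_word c l h]
        simp [pv_mk_append]
    · intro acc w
      by_cases h : pvWs c = true
      · simp only [List.foldl_cons, splitStep, h, if_pos]
        rw [ih.1 (acc ++ [w])]
        simp [h, splitScan_cons_ws c l h]
      · simp only [Bool.not_eq_true] at h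
        simp only [List.foldl_cons, splitStep, h, Bool.false_eq_true, if_false]
        norm_num
        rw [pv_setLast, ih.2 acc (w ++ String.ofList [c])]
        simp [h, pv_mk_append, String.append_assoc]

-- ===== VERDICT (by name: the statement is the Claim_ definition above) =====
theorem splitmessage_spec : Claim_equal_splitmessage := by
  intro s _
  unfold Spec_splitmessage splitmessage splitmessage_alt
  have h := (splitA_loop s.toList).1 []
  simpa using h
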